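-- pv_equiv track=rewrite | github.com/SDLegend/CodeTown | Python/Two Characters.py | checkalternate
-- ===== SOURCE A (Python) =====
-- def checkalternate(stringy,a,b):
--     last,count="",0
--     for i in stringy:
--         if i==a and last==a:
--             return 0
--         elif i==b and last==b:
--             return 0
--         elif i==a:
--             last=a
--             count+=1
--         elif i==b:
--             last=b
--             count+=1
--     return count
-- ===== SOURCE B (Python) =====
-- def checkalternate(stringy, a, b):
--     filtered = [c for c in stringy if c == a or c == b]
--     for x, y in zip(filtered, filtered[1:]):
--         if x == y:
--             return 0
--     return len(filtered)
-- ===== Notes on version B (the rewrite author's own statement) =====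
-- stated objective: alternative
-- what changed: Replaces A's single stateful guard-and-count loop (tracking the last seen marker and an early return inside the count loop) by a two-phase decomposition: first filter the kept characters, then scan adjacent pairs of the filtered list and return its length if no two neighbours are equal.
import Mathlib
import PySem

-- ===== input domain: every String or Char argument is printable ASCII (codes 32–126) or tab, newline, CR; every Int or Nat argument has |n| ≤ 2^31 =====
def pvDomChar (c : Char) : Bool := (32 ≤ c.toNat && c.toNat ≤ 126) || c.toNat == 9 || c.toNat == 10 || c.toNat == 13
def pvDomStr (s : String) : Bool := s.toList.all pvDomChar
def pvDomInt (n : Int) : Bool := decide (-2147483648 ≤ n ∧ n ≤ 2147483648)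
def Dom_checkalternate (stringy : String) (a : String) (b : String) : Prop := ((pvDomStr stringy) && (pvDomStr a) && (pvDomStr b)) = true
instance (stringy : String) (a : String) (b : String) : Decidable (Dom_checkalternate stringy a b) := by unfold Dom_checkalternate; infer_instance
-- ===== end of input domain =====

-- B replaces A's single stateful guard-and-count loop by a two-phase decomposition:
-- filter the kept characters first, then check adjacent pairs of the filtered list
-- and return its length (objective: alternative decomposition, same cost).

-- ===== PORT A =====
-- A's for-loop: state (last, count), early return 0 on a repeated marker.
def checkalternateLoop (a b : String) : List Char → String → Int → Int
  | [], _, count => count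
  | c :: cs, last, count =>
    let i := String.ofList [c]
    if i == a && last == a then 0
    else if i == b && last == b then 0
    else if i == a then checkalternateLoop a b cs a (count + 1)
    else if i == b then checkalternateLoop a b cs b (count + 1)
    else checkalternateLoop a b cs last count

def checkalternate (stringy : String) (a : String) (b : String) : Int :=
  checkalternateLoop a b stringy.toList "" 0

-- ===== PORT B =====
def checkalternate_alt (stringy : String) (a : String) (b : String) : Int :=
  let filtered := stringy.toList.filter (fun c => String.ofList [c] == a || String.ofList [c] == b)
  if (filtered.zip (filtered.drop 1)).any (fun p => p.1 == p.2) then 0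
  else (filtered.length : Int)

-- ===== PRECONDITION & SPEC =====
def Spec_checkalternate (stringy : String) (a : String) (b : String) (out : Int) : Prop := out = checkalternate_alt stringy a b
instance (stringy : String) (a : String) (b : String) (out : Int) : Decidable (Spec_checkalternate stringy a b out) := by unfold Spec_checkalternate; infer_instance

-- ===== CLAIM (what is proved, stated in full; the proofs are below) =====
def Claim_equal_checkalternate : Prop := ∀ (stringy : String) (a : String) (b : String), Dom_checkalternate stringy a b → Spec_checkalternate stringy a b (checkalternate stringy a b)

-- ===== LEMMAS AND PROOFS =====

-- proof-side: "last" as an optional previous kept character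
def pvLastOf : Option Char → String
  | none => ""
  | some c => String.ofList [c]

-- proof-side: repeated-neighbour test threaded the way A threads `last`
def pvBad : Option Char → List Char → Bool
  | _, [] => false
  | p, c :: cs => (some c == p) || pvBad (some c) cs

theorem pvLast_eq (p : Option Char) (c : Char) :
    pvLastOf p = String.ofList [c] ↔ p = some c := by
  cases p with
  | none =>
    simp only [pvLastOf]
    constructor
    · intro h
      have : ("" : String).toList = [c] := by rw [h]; simp
      simp at this
    · intro h; cases h
  | some d => simp [pvLastOf, String.ofList_inj]

-- one step of A's loop, rephrased: repeated kept marker → 0; kept → advance; else skip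
theorem pvStep (a b : String) (c : Char) (cs : List Char) (last : String) (count : Int) :
    checkalternateLoop a b (c :: cs) last count =
      (if String.ofList [c] == a || String.ofList [c] == b then
        (if last = String.ofList [c] then 0
         else checkalternateLoop a b cs (String.ofList [c]) (count + 1))
       else checkalternateLoop a b cs last count) := by
  simp only [checkalternateLoop, Bool.and_eq_true, Bool.or_eq_true, beq_iff_eq]
  split_ifs <;> simp_all

theorem pvLoop_eq (a b : String) (cs : List Char) (p : Option Char) (count : Int) :
    checkalternateLoop a b cs (pvLastOf p) count =
      (if pvBad p (cs.filter (fun c => String.ofList [c] == a || String.ofList [c] == b)) then 0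
       else count + (cs.filter (fun c => String.ofList [c] == a || String.ofList [c] == b)).length) := by
  induction cs generalizing p count with
  | nil => simp [checkalternateLoop, pvBad]
  | cons c cs ih =>
    rw [pvStep]
    by_cases hk : (String.ofList [c] == a || String.ofList [c] == b) = true
    · rw [if_pos hk]
      have hf : (c :: cs).filter (fun c => String.ofList [c] == a || String.ofList [c] == b)
          = c :: cs.filter (fun c => String.ofList [c] == a || String.ofList [c] == b) := by
        simp [hk]
      rw [hf]
      by_cases hp : p = some c
      · subst hp
        rw [if_pos ((pvLast_eq _ c).mpr rfl)]
        simp [pvBad]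
      · rw [if_neg (fun h => hp ((pvLast_eq p c).mp h))]
        have : String.ofList [c] = pvLastOf (some c) := rfl
        rw [this, ih (some c) (count + 1)]
        have hb : pvBad p (c :: cs.filter (fun c => String.ofList [c] == a || String.ofList [c] == b))
            = pvBad (some c) (cs.filter (fun c => String.ofList [c] == a || String.ofList [c] == b)) := by
          have hne : (some c == p) = false := by
            rcases p with _ | d
            · simp
            · rw [beq_eq_false_iff_ne]
              intro h
              exact hp (by rw [← Option.some_inj.mp h])
          simp [pvBad, hne]
        rw [hb]
        split <;> simp <;> ring
    · rw [if_neg hk]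
      have hf : (c :: cs).filter (fun c => String.ofList [c] == a || String.ofList [c] == b)
          = cs.filter (fun c => String.ofList [c] == a || String.ofList [c] == b) := by
        simp [hk]
      rw [hf, ih p count]

theorem pvBad_some (fs : List Char) (p : Char) :
    pvBad (some p) fs = ((p :: fs).zip fs).any (fun q => q.1 == q.2) := by
  induction fs generalizing p with
  | nil => simp [pvBad]
  | cons c cs ih =>
    simp only [pvBad, List.zip_cons_cons, List.any_cons, ih c]
    congr 1
    simp [Bool.beq_comm]

theorem pvBad_none (fs : List Char) :
    pvBad none fs = (fs.zip (fs.drop 1)).any (fun q => q.1 == q.2) := by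
  cases fs with
  | nil => simp [pvBad]
  | cons c cs => simp [pvBad, pvBad_some]

-- ===== VERDICT (by name: the statement is the Claim_ definition above) =====
theorem checkalternate_spec : Claim_equal_checkalternate := by
  intro stringy a b _
  unfold Spec_checkalternate checkalternate checkalternate_alt
  have h := pvLoop_eq a b stringy.toList none 0
  simp only [pvLastOf] at h
  rw [h, pvBad_none]
  simp only [List.drop_one, zero_add]
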